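-- pv_equiv track=rewrite | github.com/lucasportella/Trybe | exercises/module4/estrutura-de-dados/arrays/exercises/ex1.py | instability_calculator
-- ===== SOURCE A (Python) =====
-- def instability_calculator(array):
--     counter = 0
--     max_counter = 0
--     for c in array:
--         if c == 1:
--             counter += 1
--         if c == 0:
--             if counter > max_counter:
--                 max_counter = counter
--             counter = 0
--     return max_counter
-- ===== SOURCE B (Python) =====
-- def instability_calculator(array):
--     zeros = [i for i, c in enumerate(array) if c == 0]
--     gaps = [array[s + 1:z] for s, z in zip([-1] + zeros, zeros)]
--     counts = [gap.count(1) for gap in gaps]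
--     return max(counts, default=0)
-- ===== Notes on version B (the rewrite author's own statement) =====
-- stated objective: alternative
-- what changed: B is staged and stateless: it first collects the indices of the zeros, then slices the array into the gaps between consecutive zeros, counts the 1s in each slice, and returns the max of those counts (0 if there is no zero) - no running counter or running max; it preserves A's quirks (trailing run after the last zero never counted, non-0/1 values ignored).
import Mathlib
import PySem

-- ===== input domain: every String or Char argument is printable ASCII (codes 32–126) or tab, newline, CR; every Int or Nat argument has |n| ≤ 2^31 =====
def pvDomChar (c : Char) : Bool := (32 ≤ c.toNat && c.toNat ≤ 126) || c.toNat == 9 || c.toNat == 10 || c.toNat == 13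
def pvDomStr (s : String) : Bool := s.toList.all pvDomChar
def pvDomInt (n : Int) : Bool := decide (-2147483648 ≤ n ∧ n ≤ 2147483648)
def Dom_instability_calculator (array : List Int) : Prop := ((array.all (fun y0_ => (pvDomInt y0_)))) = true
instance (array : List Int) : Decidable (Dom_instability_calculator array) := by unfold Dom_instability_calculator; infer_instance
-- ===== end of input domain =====

-- B is staged and stateless: it collects the zero indices, slices the array into the gaps
-- between consecutive zeros, counts the 1s per gap, and takes the max (0 if no zero) —
-- instead of A's single pass with a running counter and running max; alternative decomposition, same values.


-- ===== PORT A =====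
-- loop body of A: first `if c == 1` bumps counter, then `if c == 0` takes the max and resets
def pvStepA (p : Int × Int) (c : Int) : Int × Int :=
  let counter := if c = 1 then p.1 + 1 else p.1
  if c = 0 then (0, if counter > p.2 then counter else p.2) else (counter, p.2)

def instability_calculator (array : List Int) : Int :=
  (array.foldl pvStepA (0, 0)).2

-- ===== PORT B =====
def instability_calculator_alt (array : List Int) : Int :=
  let zeros := ((PySem.List.enumerate array).filter (fun p => p.2 == 0)).map (fun p => p.1)
  let gaps := (List.zip ((-1) :: zeros) zeros).map
      (fun p => PySem.List.slice array (some (p.1 + 1)) (some p.2))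
  let counts := gaps.map (fun gap => (PySem.List.count gap 1 : Int))
  match PySem.List.max? counts (fun x => x) with   -- max(counts, default=0)
  | some m => m
  | none => 0

-- ===== PRECONDITION & SPEC =====
def Spec_instability_calculator (array : List Int) (out : Int) : Prop := out = instability_calculator_alt array
instance (array : List Int) (out : Int) : Decidable (Spec_instability_calculator array out) := by unfold Spec_instability_calculator; infer_instance

-- ===== CLAIM (what is proved, stated in full; the proofs are below) =====
def Claim_equal_instability_calculator : Prop := ∀ (array : List Int), Dom_instability_calculator array → Spec_instability_calculator array (instability_calculator array)

-- ===== LEMMAS AND PROOFS =====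

-- proof-side spec: the list of run lengths terminated by each zero, in order
def pvRuns : List Int → Int → List Int
  | [], _ => []
  | c :: t, run =>
    if c = 1 then pvRuns t (run + 1)
    else if c = 0 then run :: pvRuns t 0
    else pvRuns t run

-- A's running maximum is the fold of max over the run lengths
theorem pv_A_runs (l : List Int) (run m : Int) :
    (l.foldl pvStepA (run, m)).2 = (pvRuns l run).foldl max m := by
  induction l generalizing run m with
  | nil => simp [pvRuns]
  | cons c t ih =>
    simp only [List.foldl_cons, pvStepA, pvRuns]
    by_cases h1 : c = 1
    · simpa [h1] using ih (run + 1) m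
    · by_cases h0 : c = 0
      · subst h0; norm_num
        have : (if run > m then run else m) = max m run := by
          split_ifs with h
          · exact (max_eq_right h.le).symm
          · exact (max_eq_left (not_lt.mp h)).symm
        rw [this, ih 0 (max m run)]
      · simp [h1, h0, ih run m]

theorem pv_runs_nonneg (l : List Int) (run : Int) (hr : 0 ≤ run) :
    ∀ x ∈ pvRuns l run, 0 ≤ x := by
  induction l generalizing run with
  | nil => simp [pvRuns]
  | cons c t ih =>
    simp only [pvRuns]
    by_cases h1 : c = 1
    · simpa [h1] using ih (run + 1) (by omega)
    · by_cases h0 : c = 0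
      · subst h0; norm_num
        exact ⟨hr, ih 0 le_rfl⟩
      · simpa [h1, h0] using ih run hr

theorem pv_runs_no_zero (l : List Int) (run : Int) (h : (0 : Int) ∉ l) :
    pvRuns l run = [] := by
  induction l generalizing run with
  | nil => rfl
  | cons c t ih =>
    simp only [List.mem_cons, not_or] at h
    simp only [pvRuns]
    by_cases h1 : c = 1
    · simpa [h1] using ih (run + 1) h.2
    · simp [h1, Ne.symm h.1, ih run h.2]

theorem pv_runs_split (pre suf : List Int) (run : Int) (h : (0 : Int) ∉ pre) :
    pvRuns (pre ++ 0 :: suf) run = (run + (pre.count 1 : Int)) :: pvRuns suf 0 := by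
  induction pre generalizing run with
  | nil => simp [pvRuns]
  | cons c t ih =>
    simp only [List.mem_cons, not_or] at h
    simp only [List.cons_append, pvRuns]
    by_cases h1 : c = 1
    · rw [if_pos h1, ih (run + 1) h.2]
      subst h1
      simp
      omega
    · rw [if_neg h1, if_neg (Ne.symm h.1), ih run h.2]
      simp [h1]

-- the zero-index list as B computes it, with an arbitrary enumerate start
def pvZs (xs : List Int) (s : Int) : List Int :=
  ((PySem.List.enumerate xs s).filter (fun p => p.2 == 0)).map (fun p => p.1)

theorem pv_zs_nil (s : Int) : pvZs [] s = [] := by simp [pvZs, PySem.List.enumerate_nil]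

theorem pv_zs_cons (c : Int) (t : List Int) (s : Int) :
    pvZs (c :: t) s = if c = 0 then s :: pvZs t (s + 1) else pvZs t (s + 1) := by
  simp only [pvZs, PySem.List.enumerate_cons, List.filter_cons]
  by_cases h : c = 0 <;> simp [h]

theorem pv_map_shift (L : List Int) (s : Int) :
    (L.map (· + (0 + 1))).map (· + s) = L.map (· + (s + 1)) := by
  rw [List.map_map]
  exact List.map_congr_left (fun x _ => by simp [Function.comp]; omega)

theorem pv_zs_shift (xs : List Int) (s : Int) :
    pvZs xs s = (pvZs xs 0).map (· + s) := by
  induction xs generalizing s with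
  | nil => simp [pv_zs_nil]
  | cons c t ih =>
    rw [pv_zs_cons, pv_zs_cons]
    by_cases h : c = 0
    · rw [if_pos h, if_pos h, ih (s + 1), ih (0 + 1), List.map_cons, pv_map_shift]
      norm_num
    · rw [if_neg h, if_neg h, ih (s + 1), ih (0 + 1), pv_map_shift]

theorem pv_zs_no_zero (l : List Int) (s : Int) (h : (0 : Int) ∉ l) : pvZs l s = [] := by
  induction l generalizing s with
  | nil => exact pv_zs_nil s
  | cons c t ih =>
    simp only [List.mem_cons, not_or] at h
    rw [pv_zs_cons, if_neg (Ne.symm h.1)]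
    exact ih (s + 1) h.2

theorem pv_zs_ge (l : List Int) : ∀ s : Int, ∀ y ∈ pvZs l s, s ≤ y := by
  induction l with
  | nil => intro s y hy; rw [pv_zs_nil] at hy; cases hy
  | cons c t ih =>
    intro s y hy
    rw [pv_zs_cons] at hy
    by_cases h : c = 0
    · rw [if_pos h] at hy
      rcases List.mem_cons.mp hy with h' | h'
      · omega
      · have := ih (s + 1) y h'; omega
    · rw [if_neg h] at hy
      have := ih (s + 1) y hy; omega

theorem pv_zs_nonneg (l : List Int) (x : Int) (hx : x ∈ pvZs l 0) : 0 ≤ x :=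
  pv_zs_ge l 0 x hx

theorem pv_zs_split (pre suf : List Int) (h : (0 : Int) ∉ pre) :
    pvZs (pre ++ 0 :: suf) 0 =
      (pre.length : Int) :: (pvZs suf 0).map (· + ((pre.length : Int) + 1)) := by
  induction pre with
  | nil =>
    rw [List.nil_append, pv_zs_cons, if_pos rfl, pv_zs_shift suf (0 + 1)]
    norm_num
  | cons c t ih =>
    simp only [List.mem_cons, not_or] at h
    rw [List.cons_append, pv_zs_cons, if_neg (Ne.symm h.1), pv_zs_shift _ (0 + 1), ih h.2,
      List.map_cons, List.map_map]
    refine List.cons_eq_cons.mpr ⟨by simp, ?_⟩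
    exact List.map_congr_left (fun x _ => by simp [Function.comp]; ring)

-- B's gap counts over an array (the body of instability_calculator_alt before the max)
def pvCounts (array : List Int) : List Int :=
  ((List.zip ((-1) :: pvZs array 0) (pvZs array 0)).map
      (fun p => PySem.List.slice array (some (p.1 + 1)) (some p.2))).map
    (fun gap => PySem.List.count gap 1)

-- shifting both slice bounds by the prefix length lands in the suffix
theorem pv_slice_shift (pre suf : List Int) (a b : Int) (ha : 0 ≤ a) (hb : 0 ≤ b) :
    PySem.List.slice (pre ++ (0 : Int) :: suf)
        (some (a + ((pre.length : Int) + 1))) (some (b + ((pre.length : Int) + 1)))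
      = PySem.List.slice suf (some a) (some b) := by
  obtain ⟨a', rfl⟩ := Int.eq_ofNat_of_zero_le ha
  obtain ⟨b', rfl⟩ := Int.eq_ofNat_of_zero_le hb
  have h1 : ((a' : Int) + ((pre.length : Int) + 1)) = ((a' + (pre.length + 1) : Nat) : Int) := by
    push_cast; ring
  have h2 : ((b' : Int) + ((pre.length : Int) + 1)) = ((b' + (pre.length + 1) : Nat) : Int) := by
    push_cast; ring
  rw [h1, h2, PySem.List.slice_natCast, PySem.List.slice_natCast]
  have hbase : (pre ++ (0 : Int) :: suf).drop (pre.length + 1) = suf := by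
    rw [show pre ++ (0 : Int) :: suf = (pre ++ [0]) ++ suf by simp,
      show pre.length + 1 = (pre ++ [(0 : Int)]).length by simp, List.drop_left]
  have hd : (pre ++ (0 : Int) :: suf).drop (a' + (pre.length + 1)) = suf.drop a' := by
    rw [Nat.add_comm, ← List.drop_drop, hbase]
  rw [hd]
  congr 1
  omega

theorem pv_counts_eq_runs (n : Nat) : ∀ l : List Int, l.length ≤ n → pvCounts l = pvRuns l 0 := by
  induction n with
  | zero =>
    intro l hl
    have : l = [] := List.eq_nil_of_length_eq_zero (Nat.le_zero.mp hl)
    subst this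
    simp [pvCounts, pv_zs_nil, pvRuns]
  | succ n ih =>
    intro l hl
    by_cases hz : (0 : Int) ∈ l
    · obtain ⟨pre, suf, rfl, hpre⟩ : ∃ pre suf, l = pre ++ 0 :: suf ∧ (0 : Int) ∉ pre := by
        have hsome : (PySem.List.index? l 0).isSome := by
          rw [PySem.List.index?_isSome_iff]; exact hz
        obtain ⟨k, hk⟩ := Option.isSome_iff_exists.mp hsome
        obtain ⟨pre, suf, hsplit, _, hpre⟩ := (PySem.List.index?_eq_some_iff l 0 k).mp hk
        exact ⟨pre, suf, hsplit, hpre⟩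
      rw [pv_runs_split pre suf 0 hpre, pvCounts, pv_zs_split pre suf hpre]
      -- head gap is `pre`
      have hhead : PySem.List.slice (pre ++ (0:Int) :: suf) (some (-1 + 1)) (some (pre.length : Int))
          = pre := by
        norm_num
      -- tail pairs: zip of shifted lists is the shifted zip
      have hzip : List.zip ((pre.length : Int) :: (pvZs suf 0).map (· + ((pre.length : Int) + 1)))
            ((pvZs suf 0).map (· + ((pre.length : Int) + 1)))
          = (List.zip ((-1) :: pvZs suf 0) (pvZs suf 0)).map
              (Prod.map (· + ((pre.length : Int) + 1)) (· + ((pre.length : Int) + 1))) := by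
        have : (pre.length : Int) :: (pvZs suf 0).map (· + ((pre.length : Int) + 1))
            = ((-1) :: pvZs suf 0).map (· + ((pre.length : Int) + 1)) := by
          simp
        rw [this, List.zip_map]
      simp only [List.zip_cons_cons, List.map_cons, hzip, List.map_map]
      rw [hhead]
      have htail : ∀ p ∈ List.zip ((-1) :: pvZs suf 0) (pvZs suf 0),
          (PySem.List.count
            (PySem.List.slice (pre ++ (0:Int) :: suf)
              (some ((Prod.map (· + ((pre.length : Int) + 1)) (· + ((pre.length : Int) + 1)) p).1 + 1))
              (some ((Prod.map (· + ((pre.length : Int) + 1)) (· + ((pre.length : Int) + 1)) p).2))) 1)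
          = PySem.List.count (PySem.List.slice suf (some (p.1 + 1)) (some p.2)) 1 := by
        intro p hp
        have hp1 : p.1 ∈ (-1) :: pvZs suf 0 := (List.of_mem_zip hp).1
        have hp2 : p.2 ∈ pvZs suf 0 := (List.of_mem_zip hp).2
        have h1 : 0 ≤ p.1 + 1 := by
          rcases List.mem_cons.mp hp1 with h | h
          · omega
          · have := pv_zs_nonneg suf p.1 h; omega
        have h2 : 0 ≤ p.2 := pv_zs_nonneg suf p.2 hp2
        have : (Prod.map (· + ((pre.length : Int) + 1)) (· + ((pre.length : Int) + 1)) p).1 + 1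
            = (p.1 + 1) + ((pre.length : Int) + 1) := by
          simp [Prod.map]; ring
        rw [this]
        have : (Prod.map (· + ((pre.length : Int) + 1)) (· + ((pre.length : Int) + 1)) p).2
            = p.2 + ((pre.length : Int) + 1) := by
          simp [Prod.map]
        rw [this, pv_slice_shift pre suf (p.1 + 1) p.2 h1 h2]
      rw [List.map_congr_left (fun p hp => by
        rw [Function.comp_apply, Function.comp_apply, htail p hp])]
      have hsuf : suf.length ≤ n := by
        have := hl
        simp only [List.length_append, List.length_cons] at this
        omega
      have := ih suf hsuf
      rw [pvCounts] at this
      simp only [List.map_map, Function.comp_def] at this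
      rw [this]
      congr 1
      simp [PySem.List.count_eq]
    · rw [pv_runs_no_zero l 0 hz, pvCounts, pv_zs_no_zero l 0 hz]
      simp
  
theorem pv_equiv (array : List Int) :
    instability_calculator array = instability_calculator_alt array := by
  have hcounts : pvCounts array = pvRuns array 0 := pv_counts_eq_runs array.length array le_rfl
  have halt : instability_calculator_alt array =
      match PySem.List.max? (pvCounts array) (fun x => x) with
      | some m => m
      | none => 0 := by
    unfold instability_calculator_alt pvCounts pvZs
    rfl
  rw [instability_calculator, pv_A_runs array 0 0, halt, hcounts]
  have hnn := pv_runs_nonneg array 0 le_rfl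
  cases h : pvRuns array 0 with
  | nil => simp [PySem.List.max?]
  | cons x xs =>
    rw [h] at hnn
    simp only [PySem.List.max?_id_cons, List.foldl_cons]
    have hx : 0 ≤ x := hnn x (by simp)
    rw [max_eq_right hx]

-- ===== VERDICT (by name: the statement is the Claim_ definition above) =====
theorem instability_calculator_spec : Claim_equal_instability_calculator := by
  intro array _
  unfold Spec_instability_calculator
  exact pv_equiv array
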